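-- pv_equiv track=rewrite | github.com/miliar/Code_Jam_Webscraper | solutions_python/Problem_142/537.py | a2
-- ===== SOURCE A (Python) =====
-- def a2(strings):
-- 	le = len(strings[0])
-- 	for st in strings[1:]:
-- 		if len(st) != le:
-- 			return None
-- 	dev = 0
-- 	for i in range(le):
-- 		sy = strings[0][i][0]
-- 		s = strings[0][i][1]
-- 		for st in strings[1:]:
-- 			if sy != st[i][0]:
-- 				return None
-- 			s += st[i][1]
-- 		r = s // len(strings)
-- 		for st in strings:
-- 			dev += abs(st[i][1] - r)
-- 	return dev
-- ===== SOURCE B (Python) =====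
-- def a2(strings):
--     row0 = strings[0]
--     le = len(row0)
--     n = len(strings)
--     # single row-major pass: accumulate per-position sums while checking shape/symbols
--     sums = [v for _, v in row0]
--     for st in strings[1:]:
--         if len(st) != le:
--             return None
--         new_sums = []
--         for (sy, v), (sy0, _), s in zip(st, row0, sums):
--             if sy != sy0:
--                 return None
--             new_sums.append(s + v)
--         sums = new_sums
--     rs = [s // n for s in sums]
--     dev = 0
--     for st in strings:
--         for (_, v), r in zip(st, rs):
--             dev += abs(v - r)
--     return dev
-- ===== Notes on version B (the rewrite author's own statement) =====
-- stated objective: alternative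
-- what changed: B traverses row-major: one pass over the rows maintains a per-position sums list (checking shape/symbols on the way), then deviations are added row by row against the precomputed floor-means, instead of A's column-major triple loop that rescans strings[1:] twice per position.
import Mathlib
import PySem

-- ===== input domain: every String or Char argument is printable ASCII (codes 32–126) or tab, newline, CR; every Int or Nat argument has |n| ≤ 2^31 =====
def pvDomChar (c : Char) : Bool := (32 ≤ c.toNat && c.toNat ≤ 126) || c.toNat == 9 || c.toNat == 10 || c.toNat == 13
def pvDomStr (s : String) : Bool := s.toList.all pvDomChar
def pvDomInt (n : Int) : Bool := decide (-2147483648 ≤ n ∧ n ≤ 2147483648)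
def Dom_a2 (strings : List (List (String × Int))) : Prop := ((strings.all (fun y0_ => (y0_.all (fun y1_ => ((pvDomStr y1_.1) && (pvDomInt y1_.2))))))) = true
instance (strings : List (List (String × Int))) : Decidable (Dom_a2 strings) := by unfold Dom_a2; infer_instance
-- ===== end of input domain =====

-- B is row-major: a single pass over the rows maintains a per-position sums list (checking shape and
-- symbols on the way), then deviations are added row by row against the precomputed floor-means —
-- instead of A's column-major triple loop that rescans strings[1:] twice for every position.
-- Same cost, different traversal order/decomposition.

-- ===== PORT A =====
-- inner 'for st in strings[1:]' loop of A: symbol check with early return None, accumulating s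
def a2InnerA (rest : List (List (String × Int))) (i : Nat) (sy : String) (s : Int) : Option Int :=
  match rest with
  | [] => some s
  | st :: r =>
    match PySem.List.pyGet? st (i : Int) with
    | none => none  -- IndexError (unreachable after the length check)
    | some p => if sy ≠ p.1 then none else a2InnerA r i sy (s + p.2)

-- 'for st in strings: dev += abs(st[i][1] - r)'
def a2DevA (strings : List (List (String × Int))) (i : Nat) (r : Int) (dev : Int) : Int :=
  strings.foldl (fun d st =>
    match PySem.List.pyGet? st (i : Int) with
    | none => d  -- IndexError (unreachable after the length check)
    | some p => d + |p.2 - r|) dev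

-- the outer 'for i in range(le)' loop
def a2OuterA (strings : List (List (String × Int))) (s0 : List (String × Int)) (le : Nat)
    (i : Nat) (dev : Int) : Option Int :=
  if _h : i < le then
    match PySem.List.pyGet? s0 (i : Int) with
    | none => none  -- IndexError (unreachable: i < le = len(strings[0]))
    | some p =>
      match a2InnerA (strings.drop 1) i p.1 p.2 with
      | none => none
      | some s =>
        let r := PySem.Int.floordiv s (strings.length : Int)
        a2OuterA strings s0 le (i + 1) (a2DevA strings i r dev)
  else some dev
termination_by le - i

def a2 (strings : List (List (String × Int))) : Option Int :=
  match PySem.List.pyGet? strings 0 with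
  | none => none  -- strings[0] raises IndexError on []: excluded by Pre_a2
  | some s0 =>
    let le := s0.length
    if (strings.drop 1).any (fun st => st.length ≠ le) then none
    else a2OuterA strings s0 le 0 0

-- ===== PORT B =====
-- the inner 'for (sy, v), (sy0, _), s in zip(st, row0, sums)' loop: builds new_sums, None on mismatch
def sumRow : List (String × Int) → List (String × Int) → List Int → Option (List Int)
  | (sy, v) :: st, (sy0, _) :: r0, s :: ss =>
      if sy ≠ sy0 then none
      else (sumRow st r0 ss).map (fun t => (s + v) :: t)
  | _, _, _ => some []  -- zip stops at the shortest list

-- the 'for st in strings[1:]' loop threading sums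
def rowsFold : List (List (String × Int)) → List (String × Int) → List Int → Option (List Int)
  | [], _, sums => some sums
  | st :: rest, row0, sums =>
      if st.length ≠ row0.length then none
      else match sumRow st row0 sums with
        | none => none
        | some s' => rowsFold rest row0 s'

def a2_alt (strings : List (List (String × Int))) : Option Int :=
  match strings with
  | [] => none  -- strings[0] raises IndexError on []: excluded by Pre_a2
  | row0 :: rest =>
    match rowsFold rest row0 (row0.map Prod.snd) with
    | none => none
    | some sums =>
      let rs := sums.map (fun s => PySem.Int.floordiv s ((row0 :: rest).length : Int))
      some ((row0 :: rest).foldl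
        (fun d st => (st.zip rs).foldl (fun d2 pr => d2 + |pr.1.2 - pr.2|) d) 0)

-- ===== PRECONDITION & SPEC =====
-- Pre_ excludes only the empty list, on which the Python A (and B) raises IndexError at strings[0]
def Pre_a2 (strings : List (List (String × Int))) : Prop := strings ≠ []
instance (strings : List (List (String × Int))) : Decidable (Pre_a2 strings) := by unfold Pre_a2; infer_instance
def pvWitness_a2 : (List (List (String × Int))) := [[("a", 3), ("b", -1)], [("a", 5), ("b", 2)]]

def Spec_a2 (strings : List (List (String × Int))) (out : Option Int) : Prop := out = a2_alt strings
instance (strings : List (List (String × Int))) (out : Option Int) : Decidable (Spec_a2 strings out) := by unfold Spec_a2; infer_instance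

-- ===== CLAIM (what is proved, stated in full; the proofs are below) =====
def Claim_equal_a2 : Prop := ∀ (strings : List (List (String × Int))), Dom_a2 strings → Pre_a2 strings → Spec_a2 strings (a2 strings)

-- ===== LEMMAS AND PROOFS =====

-- column i of the rows
def colAt (ls : List (List (String × Int))) (i : Nat) : List (String × Int) :=
  ls.map (fun l => (l[i]?).getD ("", 0))

-- the common column-level description both ports are reduced to
def colStep (n : Int) (acc : Option Int) (col : List (String × Int)) : Option Int :=
  acc.bind fun dev =>
    match col with
    | [] => none
    | c0 :: _ =>
      if col.any (fun p => p.1 ≠ c0.1) then none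
      else
        let vals := col.map Prod.snd
        let r := PySem.Int.floordiv vals.sum n
        some (dev + (vals.map (fun v => |v - r|)).sum)

def colBad (col : List (String × Int)) : Bool :=
  col.any (fun p => p.1 ≠ (col.headD ("", 0)).1)

def colDev (n : Int) (col : List (String × Int)) : Int :=
  let vals := col.map Prod.snd
  let r := PySem.Int.floordiv vals.sum n
  (vals.map (fun v => |v - r|)).sum

lemma colStep_none (n : Int) (l : List (List (String × Int))) :
    l.foldl (colStep n) none = none := by
  induction l with
  | nil => rfl
  | cons c cs ih => simpa [colStep] using ih

lemma foldl_colStep_char (n : Int) :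
    ∀ (cols : List (List (String × Int))) (d : Int), (∀ col ∈ cols, col ≠ []) →
    cols.foldl (colStep n) (some d) =
      if cols.any colBad then none else some (d + (cols.map (colDev n)).sum) := by
  intro cols
  induction cols with
  | nil => intro d _; simp
  | cons col cs ih =>
    intro d hne
    obtain ⟨c0, ct, rfl⟩ : ∃ c0 ct, col = c0 :: ct := by
      cases col with
      | nil => exact absurd rfl (hne [] (by simp))
      | cons a b => exact ⟨a, b, rfl⟩
    rw [List.foldl_cons]
    by_cases hb : colBad (c0 :: ct) = true
    · have hb' : ((c0 :: ct).any fun p => decide (p.1 ≠ c0.1)) = true := by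
        simpa only [colBad, List.headD_cons] using hb
      have hnone : colStep n (some d) (c0 :: ct) = none := by
        simp only [colStep, Option.bind]
        rw [if_pos hb']
      rw [hnone, colStep_none, List.any_cons, hb, Bool.true_or, if_pos rfl]
    · have hb0 : colBad (c0 :: ct) = false := Bool.eq_false_iff.mpr hb
      have hb' : ((c0 :: ct).any fun p => decide (p.1 ≠ c0.1)) = false := by
        simpa only [colBad, List.headD_cons] using hb0
      have hstep : colStep n (some d) (c0 :: ct) = some (d + colDev n (c0 :: ct)) := by
        simp only [colStep, Option.bind, colDev]
        rw [if_neg (by rw [hb']; exact Bool.false_ne_true)]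
      rw [hstep, ih _ (fun c hc => hne c (by simp [hc]))]
      rw [List.any_cons, hb0, Bool.false_or]
      split_ifs with h
      · rfl
      · simp [add_assoc]

-- ===== A reduced to the column fold =====

lemma innerA_eq (i : Nat) (le : Nat) (hi : i < le) (sy : String) :
    ∀ (rest : List (List (String × Int))) (s : Int), (∀ l ∈ rest, l.length = le) →
    a2InnerA rest i sy s =
      if (colAt rest i).any (fun p => p.1 ≠ sy) then none
      else some (s + ((colAt rest i).map Prod.snd).sum) := by
  intro rest
  induction rest with
  | nil => intro s _; simp [a2InnerA, colAt]
  | cons st r ih =>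
    intro s hlen
    have hst : st.length = le := hlen st (by simp)
    have hget : PySem.List.pyGet? st (i : Int) = some st[i] := by
      rw [PySem.List.pyGet?_natCast]
      exact List.getElem?_eq_getElem (by omega)
    have hcol : colAt (st :: r) i = st[i] :: colAt r i := by
      simp [colAt, List.getElem?_eq_getElem (show i < st.length by omega)]
    rw [a2InnerA, hget, hcol]
    by_cases hsy : sy = st[i].1
    · subst hsy
      simp only [ne_eq, not_true_eq_false, if_false]
      rw [ih (s + st[i].2) (fun l hl => hlen l (by simp [hl]))]
      simp only [List.any_cons, ne_eq, not_true, decide_false, Bool.false_or]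
      split_ifs with h
      · rfl
      · simp [add_assoc]
    · simp [hsy, Ne.symm hsy]

lemma devA_eq (i : Nat) (le : Nat) (hi : i < le) (r : Int) :
    ∀ (ls : List (List (String × Int))) (dev : Int), (∀ l ∈ ls, l.length = le) →
    a2DevA ls i r dev = dev + (((colAt ls i).map Prod.snd).map (fun v => |v - r|)).sum := by
  intro ls
  induction ls with
  | nil => intro dev _; simp [a2DevA, colAt]
  | cons st t ih =>
    intro dev hlen
    have hst : st.length = le := hlen st (by simp)
    have hget : PySem.List.pyGet? st (i : Int) = some st[i] := by
      rw [PySem.List.pyGet?_natCast]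
      exact List.getElem?_eq_getElem (by omega)
    have hcol : colAt (st :: t) i = st[i] :: colAt t i := by
      simp [colAt, List.getElem?_eq_getElem (show i < st.length by omega)]
    rw [a2DevA, hcol]
    simp only [List.foldl_cons, hget]
    have := ih (dev + |st[i].2 - r|) (fun l hl => hlen l (by simp [hl]))
    rw [a2DevA] at this
    rw [this]
    simp
    ring

lemma outerA_eq (strings : List (List (String × Int))) (s0 : List (String × Int))
    (rest : List (List (String × Int))) (hs : strings = s0 :: rest) (le : Nat)
    (hlen : ∀ l ∈ strings, l.length = le) :
    ∀ (k i : Nat), i + k = le → ∀ (dev : Int),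
    a2OuterA strings s0 le i dev =
      ((List.range' i k).map (colAt strings)).foldl (colStep (strings.length : Int)) (some dev) := by
  intro k
  induction k with
  | zero =>
    intro i hik dev
    rw [a2OuterA]
    simp [show ¬ i < le by omega]
  | succ m ih =>
    intro i hik dev
    have hi : i < le := by omega
    have hs0 : s0.length = le := hlen s0 (by simp [hs])
    have hget : PySem.List.pyGet? s0 (i : Int) = some s0[i] := by
      rw [PySem.List.pyGet?_natCast]
      exact List.getElem?_eq_getElem (by omega)
    have hrestlen : ∀ l ∈ rest, l.length = le := fun l hl => hlen l (by simp [hs, hl])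
    have hcol : colAt strings i = s0[i] :: colAt rest i := by
      simp [hs, colAt, List.getElem?_eq_getElem (show i < s0.length by omega)]
    have hdrop : strings.drop 1 = rest := by simp [hs]
    rw [a2OuterA]
    simp only [hi, dif_pos, hget, hdrop]
    rw [innerA_eq i le hi s0[i].1 rest s0[i].2 hrestlen]
    rw [List.range'_succ, List.map_cons, List.foldl_cons]
    by_cases hany : (colAt rest i).any (fun p => p.1 ≠ s0[i].1) = true
    · have hnone : colStep (strings.length : Int) (some dev) (colAt strings i) = none := by
        rw [hcol]
        simp only [colStep, Option.bind, List.any_cons, ne_eq, not_true,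
          decide_false, Bool.false_or]
        split_ifs with h
        · rfl
        · exact absurd hany h
      simp only [hany, if_true, hnone, colStep_none]
    · simp only [Bool.not_eq_true] at hany
      simp only [hany, Bool.false_eq_true, if_false]
      have hstep : colStep (strings.length : Int) (some dev) (colAt strings i) =
          some (dev + (((colAt strings i).map Prod.snd).map
            (fun v => |v - PySem.Int.floordiv (((colAt strings i).map Prod.snd).sum) (strings.length : Int)|)).sum) := by
        rw [hcol]
        simp only [colStep, Option.bind, List.any_cons, ne_eq, not_true,
          decide_false, Bool.false_or]
        split_ifs with h
        · exact absurd h (ne_true_of_eq_false hany)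
        · rfl
      rw [hstep]
      rw [ih (i + 1) (by omega) _]
      congr 1
      rw [devA_eq i le hi _ strings dev hlen]
      simp [hcol]

-- ===== B reduced to the same column fold =====

-- zip of two equal-length lists as a map over range
lemma zip_eq_range_map {α β : Type} (d1 : α) (d2 : β) :
    ∀ (xs : List α) (ys : List β), xs.length = ys.length →
    xs.zip ys = (List.range xs.length).map
      (fun i => ((xs[i]?).getD d1, (ys[i]?).getD d2)) := by
  intro xs
  induction xs with
  | nil => intro ys _; simp
  | cons x xt ih =>
    intro ys hlen
    cases ys with
    | nil => simp at hlen
    | cons y yt =>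
      simp only [List.zip_cons_cons, List.length_cons, List.range_succ_eq_map,
        List.map_cons, List.map_map, List.getElem?_cons_zero, Option.getD_some]
      congr 1
      rw [ih yt (by simpa using hlen)]
      apply List.map_congr_left
      intro i _
      simp

lemma sumRow_char : ∀ (st row0 : List (String × Int)) (sums : List Int),
    st.length = row0.length → row0.length = sums.length →
    sumRow st row0 sums =
      if (st.zip row0).any (fun q => q.1.1 ≠ q.2.1) then none
      else some (List.zipWith (· + ·) sums (st.map Prod.snd)) := by
  intro st
  induction st with
  | nil =>
    intro row0 sums h1 h2
    have : row0 = [] := by simpa [List.length_eq_zero_iff] using h1.symm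
    subst this
    simp [sumRow]
  | cons p st ih =>
    intro row0 sums h1 h2
    cases row0 with
    | nil => simp at h1
    | cons q r0 =>
      cases sums with
      | nil => simp at h2
      | cons s ss =>
        obtain ⟨sy, v⟩ := p
        obtain ⟨sy0, w⟩ := q
        rw [sumRow]
        by_cases hm : sy = sy0
        · subst hm
          simp only [ne_eq, not_true_eq_false, if_false]
          rw [ih r0 ss (by simpa using h1) (by simpa using h2)]
          simp only [List.zip_cons_cons, List.any_cons, ne_eq, not_true,
            decide_false, Bool.false_or]
          split_ifs with h
          · rfl
          · simp
        · simp [hm]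

-- the sums list after the row loop, described column-wise
lemma rowsFold_char (row0 : List (String × Int)) :
    ∀ (rest : List (List (String × Int))) (sums : List Int), row0.length = sums.length →
    rowsFold rest row0 sums =
      if rest.any (fun st => st.length ≠ row0.length ||
          (st.zip row0).any (fun q => q.1.1 ≠ q.2.1)) then none
      else some (rest.foldl (fun acc st => List.zipWith (· + ·) acc (st.map Prod.snd)) sums) := by
  intro rest
  induction rest with
  | nil => intro sums _; simp [rowsFold]
  | cons st r ih =>
    intro sums hlen
    rw [rowsFold]
    by_cases hl : st.length = row0.length
    · rw [if_neg (by simp [hl])]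
      rw [sumRow_char st row0 sums hl hlen]
      by_cases hm : ((st.zip row0).any fun q => decide (q.1.1 ≠ q.2.1)) = true
      · rw [if_pos hm]
        have hc : ((st :: r).any fun st => decide (st.length ≠ row0.length) ||
            (st.zip row0).any fun q => decide (q.1.1 ≠ q.2.1)) = true := by
          rw [List.any_cons, hm]
          simp
        rw [if_pos hc]
      · rw [if_neg hm]
        show rowsFold r row0 (List.zipWith (· + ·) sums (st.map Prod.snd)) = _
        rw [ih (List.zipWith (· + ·) sums (st.map Prod.snd))
          (by simp [List.length_zipWith]; omega)]
        have h2 : ((st.zip row0).any fun q => decide (q.1.1 ≠ q.2.1)) = false :=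
          Bool.eq_false_iff.mpr hm
        simp only [ne_eq] at h2 ⊢
        rw [List.any_cons, h2]
        have hA : (decide ¬(st.length = row0.length)) = false := by simp [hl]
        rw [hA, Bool.false_or, Bool.false_or, List.foldl_cons]
    · simp [hl]

-- getElem? of the folded sums list: column sums
lemma foldl_zipWith_col (le : Nat) :
    ∀ (rest : List (List (String × Int))) (sums : List Int),
    (∀ st ∈ rest, st.length = le) → sums.length = le →
    (rest.foldl (fun acc st => List.zipWith (· + ·) acc (st.map Prod.snd)) sums).length = le ∧
    ∀ i, i < le →
      ((rest.foldl (fun acc st => List.zipWith (· + ·) acc (st.map Prod.snd)) sums)[i]?).getD 0 =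
        (sums[i]?).getD 0 + ((colAt rest i).map Prod.snd).sum := by
  intro rest
  induction rest with
  | nil => intro sums _ hs; refine ⟨hs, ?_⟩; intro i _; simp [colAt]
  | cons st r ih =>
    intro sums hlen hs
    have hst : st.length = le := hlen st (by simp)
    have hzl : (List.zipWith (· + ·) sums (st.map Prod.snd)).length = le := by
      simp [List.length_zipWith, hs, hst]
    obtain ⟨h1, h2⟩ := ih (List.zipWith (· + ·) sums (st.map Prod.snd))
      (fun l hl => hlen l (by simp [hl])) hzl
    refine ⟨h1, ?_⟩
    intro i hi
    rw [List.foldl_cons] at *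
    rw [h2 i hi]
    have hcol : colAt (st :: r) i = st[i] :: colAt r i := by
      simp [colAt, List.getElem?_eq_getElem (show i < st.length by omega)]
    rw [hcol]
    have hz : (List.zipWith (· + ·) sums (st.map Prod.snd))[i]? =
        some (sums[i] + st[i].2) := by
      rw [List.getElem?_eq_getElem (by omega)]
      simp [List.getElem_zipWith, List.getElem_map]
    rw [hz]
    rw [List.getElem?_eq_getElem (show i < sums.length by omega)]
    simp
    ring

-- per-row deviation fold as a range sum
lemma row_dev_sum (st : List (String × Int)) (rs : List Int) (le : Nat)
    (h1 : st.length = le) (h2 : rs.length = le) (d : Int) :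
    (st.zip rs).foldl (fun d2 pr => d2 + |pr.1.2 - pr.2|) d =
      d + ((List.range le).map
        (fun i => |((st[i]?).getD ("", 0)).2 - (rs[i]?).getD 0|)).sum := by
  rw [PySem.List.foldl_add]
  rw [zip_eq_range_map ("", 0) 0 st rs (by omega)]
  rw [List.map_map, h1]
  rfl

-- Σ over rows of Σ over range = Σ over range of Σ over rows
lemma sum_comm_list {α : Type} (L : List α) (M : List Nat) (g : α → Nat → Int) :
    (L.map (fun a => (M.map (g a)).sum)).sum = (M.map (fun b => (L.map (fun a => g a b)).sum)).sum := by
  induction L with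
  | nil => simp [List.map_const']
  | cons a L ih =>
    simp only [List.map_cons, List.sum_cons, ih]
    rw [← List.sum_map_add]

-- the two mismatch conditions agree
lemma bad_iff (row0 : List (String × Int)) (rest : List (List (String × Int))) (le : Nat)
    (h0 : row0.length = le) (hlen : ∀ l ∈ rest, l.length = le) :
    (((List.range le).map (colAt (row0 :: rest))).any colBad) =
      (rest.any (fun st => st.length ≠ row0.length ||
        (st.zip row0).any (fun q => q.1.1 ≠ q.2.1))) := by
  rw [Bool.eq_iff_iff]
  simp only [List.any_eq_true, List.mem_map, List.mem_range]
  constructor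
  · rintro ⟨col, ⟨i, hi, rfl⟩, hbad⟩
    have hcol : colAt (row0 :: rest) i = row0[i] :: colAt rest i := by
      simp [colAt, List.getElem?_eq_getElem (show i < row0.length by omega)]
    rw [hcol] at hbad
    simp only [colBad, List.headD_cons, List.any_cons, ne_eq, not_true, decide_false,
      Bool.false_or, List.any_eq_true, colAt, List.mem_map] at hbad
    obtain ⟨p, ⟨st, hst, rfl⟩, hp⟩ := hbad
    refine ⟨st, hst, ?_⟩
    have hstl : st.length = le := hlen st hst
    rw [Bool.or_eq_true]
    right
    rw [List.any_eq_true]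
    refine ⟨(st[i], row0[i]), ?_, ?_⟩
    · rw [zip_eq_range_map ("", 0) ("", 0) st row0 (by omega)]
      simp only [List.mem_map, List.mem_range, hstl]
      exact ⟨i, hi, by
        simp [List.getElem?_eq_getElem (show i < st.length by omega),
          List.getElem?_eq_getElem (show i < row0.length by omega)]⟩
    · simpa [List.getElem?_eq_getElem (show i < st.length by omega)] using hp
  · rintro ⟨st, hst, hb⟩
    have hstl : st.length = le := hlen st hst
    rw [Bool.or_eq_true] at hb
    rcases hb with hb | hb
    · exact absurd (by omega : st.length = row0.length) (by simpa using hb)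
    · rw [List.any_eq_true] at hb
      obtain ⟨q, hq, hne⟩ := hb
      rw [zip_eq_range_map ("", 0) ("", 0) st row0 (by omega)] at hq
      simp only [List.mem_map, List.mem_range, hstl] at hq
      obtain ⟨i, hi, rfl⟩ := hq
      refine ⟨colAt (row0 :: rest) i, ⟨i, hi, rfl⟩, ?_⟩
      have hcol : colAt (row0 :: rest) i = row0[i] :: colAt rest i := by
        simp [colAt, List.getElem?_eq_getElem (show i < row0.length by omega)]
      rw [hcol]
      simp only [colBad, List.headD_cons, List.any_cons, ne_eq, not_true, decide_false,
        Bool.false_or, List.any_eq_true, colAt, List.mem_map]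
      refine ⟨(st[i]?).getD ("", 0), ⟨st, hst, rfl⟩, ?_⟩
      simpa [List.getElem?_eq_getElem (show i < row0.length by omega)] using hne


-- the whole good case: B's row-major deviation fold equals A's column sum
lemma dev_sum_eq (strings : List (List (String × Int))) (le : Nat) (n : Int) (rs : List Int)
    (hlen : ∀ l ∈ strings, l.length = le) (hrslen : rs.length = le)
    (hrsget : ∀ i, i < le → (rs[i]?).getD 0 =
      PySem.Int.floordiv (((colAt strings i).map Prod.snd).sum) n) :
    strings.foldl (fun d st => (st.zip rs).foldl (fun d2 pr => d2 + |pr.1.2 - pr.2|) d) 0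
      = (((List.range le).map (colAt strings)).map (colDev n)).sum := by
  have hcongr := PySem.List.foldl_congr_mem (l := strings) (init := (0 : Int))
    (f := fun d st => (st.zip rs).foldl (fun d2 pr => d2 + |pr.1.2 - pr.2|) d)
    (g := fun d st =>
      d + ((List.range le).map
        (fun i => |((st[i]?).getD ("", 0)).2 - (rs[i]?).getD 0|)).sum)
    (by intro acc x hx; exact row_dev_sum x rs le (hlen x hx) hrslen acc)
  rw [hcongr]
  rw [PySem.List.foldl_add]
  rw [sum_comm_list strings (List.range le)
    (fun st i => |((st[i]?).getD ("", 0)).2 - (rs[i]?).getD 0|)]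
  rw [List.map_map]
  simp only [zero_add]
  congr 1
  apply List.map_congr_left
  intro i hi
  have hi' : i < le := List.mem_range.mp hi
  rw [Function.comp_apply]
  simp only [colDev]
  rw [hrsget i hi']
  simp only [colAt, List.map_map]
  rfl

-- ===== VERDICT (by name: the statement is the Claim_ definition above) =====
theorem a2_spec : Claim_equal_a2 := by
  intro strings _ hpre
  unfold Spec_a2
  cases strings with
  | nil => exact absurd rfl hpre
  | cons row0 rest =>
    have hget0 : PySem.List.pyGet? (row0 :: rest) 0 = some row0 := PySem.List.pyGet?_zero_cons row0 rest
    rw [a2, a2_alt, hget0]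
    have hdrop : (row0 :: rest).drop 1 = rest := by simp
    rw [hdrop]
    dsimp only
    set le := row0.length with hle
    rw [rowsFold_char row0 rest (row0.map Prod.snd) (by simp)]
    by_cases hlenbad : (rest.any fun st => st.length ≠ le) = true
    · -- some row has the wrong length: both return none
      rw [if_pos hlenbad]
      have : (rest.any (fun st => st.length ≠ row0.length ||
          (st.zip row0).any (fun q => q.1.1 ≠ q.2.1))) = true := by
        rw [List.any_eq_true] at hlenbad ⊢
        obtain ⟨st, hst, hb⟩ := hlenbad
        exact ⟨st, hst, by simp_all⟩
      rw [if_pos this]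
    · have hmis : (rest.any fun st => decide (st.length ≠ le)) = false :=
        Bool.eq_false_iff.mpr hlenbad
      rw [if_neg hlenbad]
      have hlen : ∀ l ∈ (row0 :: rest), l.length = le := by
        intro l hl
        rcases List.mem_cons.mp hl with rfl | hl
        · rfl
        · have := List.any_eq_false.mp hmis l hl
          simpa using this
      have hrlen : ∀ l ∈ rest, l.length = le := fun l hl => hlen l (by simp [hl])
      -- A side: the column fold
      rw [outerA_eq (row0 :: rest) row0 rest rfl le hlen le 0 (by omega) 0]
      rw [List.range_eq_range'.symm]
      rw [foldl_colStep_char _ ((List.range le).map (colAt (row0 :: rest))) 0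
        (by intro col hcol; obtain ⟨i, _, rfl⟩ := List.mem_map.mp hcol; simp [colAt])]
      rw [bad_iff row0 rest le rfl hrlen]
      by_cases hbad : (rest.any (fun st => st.length ≠ row0.length ||
          (st.zip row0).any (fun q => q.1.1 ≠ q.2.1))) = true
      · rw [if_pos hbad, if_pos hbad]
      · rw [if_neg hbad, if_neg hbad]
        dsimp only
        congr 1
        rw [zero_add]
        obtain ⟨hlenout, hgetout⟩ := foldl_zipWith_col le rest (row0.map Prod.snd) hrlen (by simp [hle])
        apply Eq.symm
        apply dev_sum_eq (le := le) (hlen := hlen)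
        · simp [hlenout]
        · intro i hi
          have hcol : colAt (row0 :: rest) i = row0[i] :: colAt rest i := by
            simp [colAt, List.getElem?_eq_getElem (show i < row0.length by omega)]
          rw [List.getElem?_eq_getElem (by rw [List.length_map, hlenout]; omega)]
          simp only [List.getElem_map, Option.getD_some]
          congr 1
          have h := hgetout i hi
          rw [List.getElem?_eq_getElem (by rw [hlenout]; omega)] at h
          simp only [Option.getD_some] at h
          rw [h, hcol]
          rw [List.getElem?_eq_getElem (show i < (row0.map Prod.snd).length by simp; omega)]
          simp
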